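-- pv_equiv track=rewrite | github.com/cenotelie/sapientia | sapientia/nlp/components/rel_heuristic/relation_extraction.py | sentence_segmentation
-- ===== SOURCE A (Python) =====
-- def extract_sentences_beginning_positions(text):
--     """
--     Extract sentences beginning positions from a text
--     (used to extract sentences containing specific named entities)
--     :param text: text
--     :return:
--     """
--     sentences_beginning_pos = []
--     pos = 0
--     dot = False
--     end_of_sentence = False
--     for word in text:
--         if word == ".":
--             dot = True
--         if dot:
--             if word != ".":
--                 end_of_sentence = True
--             if end_of_sentence:
--                 sentences_beginning_pos.append(pos)
--                 dot = False
--                 end_of_sentence = False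
--         pos += 1
--     return sentences_beginning_pos
--
-- def sentence_segmentation(text):
--     """
--     Sentence segmentation
--     :param text: text
--     :return: sentences
--     """
--     sentences = {}
--     sentences_and_beginning_positions = extract_sentences_beginning_positions(text)
--     previous_pos = 0
--     for pos in sentences_and_beginning_positions:
--         sentences[previous_pos] = text[previous_pos:pos]
--         previous_pos = pos
--     # last sentence
--     sentences[previous_pos] = text[previous_pos:len(text)]
--     return sentences
-- ===== SOURCE B (Python) =====
-- def sentence_segmentation(text):
--     """Single fused pass: build the sentence dict directly while scanning,
--     cutting whenever the previous word was "." and the current one is not."""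
--     sentences = {}
--     start = 0
--     prev = None
--     for i, word in enumerate(text):
--         if prev == "." and word != ".":
--             sentences[start] = text[start:i]
--             start = i
--         prev = word
--     sentences[start] = text[start:]
--     return sentences
-- ===== Notes on version B (the rewrite author's own statement) =====
-- stated objective: simpler
-- what changed: Replaced the two-pass design (helper building a positions list with dot/end_of_sentence flags, then a slicing loop) by one fused pass that tracks only the previous word and the current segment start, cutting directly when prev == '.' and the current word is not.
import Mathlib
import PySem

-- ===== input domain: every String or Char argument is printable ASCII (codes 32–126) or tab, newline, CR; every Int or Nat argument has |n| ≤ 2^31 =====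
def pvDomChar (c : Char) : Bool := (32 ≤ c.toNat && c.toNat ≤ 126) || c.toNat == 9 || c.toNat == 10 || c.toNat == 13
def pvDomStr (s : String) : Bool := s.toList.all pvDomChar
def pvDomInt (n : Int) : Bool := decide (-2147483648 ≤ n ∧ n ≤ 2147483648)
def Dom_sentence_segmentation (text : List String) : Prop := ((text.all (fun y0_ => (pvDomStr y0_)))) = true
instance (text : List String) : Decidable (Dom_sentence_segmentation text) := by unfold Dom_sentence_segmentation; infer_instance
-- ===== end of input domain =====

-- B fuses A's two passes (positions helper + slicing loop) into one pass over enumerated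
-- words with a previous-word test; equivalence of the returned dicts is proved below.


-- ===== PORT A =====
-- helper of A: state is (sentences_beginning_pos, pos, dot, end_of_sentence)
def extract_sentences_beginning_positions (text : List String) : List Int :=
  (text.foldl
    (fun (st : List Int × Int × Bool × Bool) word =>
      let sbp := st.1
      let pos := st.2.1
      let dot := if word == "." then true else st.2.2.1
      let eos := st.2.2.2
      let (sbp, dot, eos) :=
        if dot then
          let eos := if word != "." then true else eos
          if eos then (sbp ++ [pos], false, false) else (sbp, dot, eos)
        else (sbp, dot, eos)
      (sbp, pos + 1, dot, eos))
    ([], 0, false, false)).1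

def sentence_segmentation (text : List String) : List (Int × List String) :=
  let sbps := extract_sentences_beginning_positions text
  let st := sbps.foldl
    (fun (st : PySem.Dict Int (List String) × Int) pos =>
      (st.1.insert st.2 (PySem.List.slice text (some st.2) (some pos)), pos))
    (PySem.Dict.empty, 0)
  (st.1.insert st.2 (PySem.List.slice text (some st.2) (some (PySem.List.len text)))).items

-- ===== PORT B =====
-- single pass: state is (sentences, start, prev)
def sentence_segmentation_alt (text : List String) : List (Int × List String) :=
  let st := (PySem.List.enumerate text 0).foldl
    (fun (st : PySem.Dict Int (List String) × Int × Option String) p =>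
      let (d, start) :=
        if st.2.2 == some "." && p.2 != "." then
          (st.1.insert st.2.1 (PySem.List.slice text (some st.2.1) (some p.1)), p.1)
        else (st.1, st.2.1)
      (d, start, some p.2))
    (PySem.Dict.empty, 0, none)
  (st.1.insert st.2.1 (PySem.List.slice text (some st.2.1) none)).items

-- ===== PRECONDITION & SPEC =====
def Spec_sentence_segmentation (text : List String) (out : List (Int × List String)) : Prop := out = sentence_segmentation_alt text
instance (text : List String) (out : List (Int × List String)) : Decidable (Spec_sentence_segmentation text out) := by unfold Spec_sentence_segmentation; infer_instance

-- ===== CLAIM (what is proved, stated in full; the proofs are below) =====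
def Claim_equal_sentence_segmentation : Prop := ∀ (text : List String), Dom_sentence_segmentation text → Spec_sentence_segmentation text (sentence_segmentation text)

-- ===== LEMMAS AND PROOFS =====

-- named copies of the three fold bodies (definitionally equal to the inline lambdas in the ports)
def pvFA (st : List Int × Int × Bool × Bool) (word : String) : List Int × Int × Bool × Bool :=
  let sbp := st.1
  let pos := st.2.1
  let dot := if word == "." then true else st.2.2.1
  let eos := st.2.2.2
  let (sbp, dot, eos) :=
    if dot then
      let eos := if word != "." then true else eos
      if eos then (sbp ++ [pos], false, false) else (sbp, dot, eos)
    else (sbp, dot, eos)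
  (sbp, pos + 1, dot, eos)

def pvGA (T : List String) (st : PySem.Dict Int (List String) × Int) (pos : Int) :
    PySem.Dict Int (List String) × Int :=
  (st.1.insert st.2 (PySem.List.slice T (some st.2) (some pos)), pos)

def pvFB (T : List String) (st : PySem.Dict Int (List String) × Int × Option String)
    (p : Int × String) : PySem.Dict Int (List String) × Int × Option String :=
  let (d, start) :=
    if st.2.2 == some "." && p.2 != "." then
      (st.1.insert st.2.1 (PySem.List.slice T (some st.2.1) (some p.1)), p.1)
    else (st.1, st.2.1)
  (d, start, some p.2)

lemma ssA_eq (t : List String) :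
    sentence_segmentation t =
      (((extract_sentences_beginning_positions t).foldl (pvGA t) (PySem.Dict.empty, 0)).1.insert
        ((extract_sentences_beginning_positions t).foldl (pvGA t) (PySem.Dict.empty, 0)).2
        (PySem.List.slice t
          (some ((extract_sentences_beginning_positions t).foldl (pvGA t) (PySem.Dict.empty, 0)).2)
          (some (PySem.List.len t)))).items := rfl

lemma ssB_eq (t : List String) :
    sentence_segmentation_alt t =
      (((PySem.List.enumerate t 0).foldl (pvFB t) (PySem.Dict.empty, 0, none)).1.insert
        ((PySem.List.enumerate t 0).foldl (pvFB t) (PySem.Dict.empty, 0, none)).2.1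
        (PySem.List.slice t
          (some ((PySem.List.enumerate t 0).foldl (pvFB t) (PySem.Dict.empty, 0, none)).2.1)
          none)).items := rfl

-- the list of sentence-boundary positions, as a plain structural recursion
def pvBnd (t : List String) (pos : Int) (dot : Bool) : List Int :=
  match t with
  | [] => []
  | w :: ws => (if dot && w != "." then [pos] else []) ++ pvBnd ws (pos + 1) (w == ".")

-- the "dot" flag after processing t (starting from dot)
def pvLastD (t : List String) (dot : Bool) : Bool :=
  (t.getLast?.map (· == ".")).getD dot

lemma pvLastD_cons (x : String) (t : List String) (dot : Bool) :
    pvLastD (x :: t) dot = pvLastD t (x == ".") := by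
  cases t with
  | nil => simp [pvLastD]
  | cons y t =>
      simp only [pvLastD, List.getLast?_cons_cons]
      cases h : (y :: t).getLast? with
      | none => simp at h
      | some z => simp

lemma pvLastD_false_eq (t : List String) :
    pvLastD t false = (t.getLast? == some ".") := by
  cases h : t.getLast? <;> simp [pvLastD, h]

lemma pvBnd_append_singleton (t : List String) (w : String) (pos : Int) (dot : Bool) :
    pvBnd (t ++ [w]) pos dot
      = pvBnd t pos dot ++ (if pvLastD t dot && w != "." then [pos + t.length] else []) := by
  induction t generalizing pos dot with
  | nil => simp [pvBnd, pvLastD]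
  | cons x t ih =>
      simp only [List.cons_append, pvBnd, ih, pvLastD_cons, List.length_cons]
      rw [List.append_assoc]
      congr 2
      push_cast
      ring_nf

lemma pvFA_step (acc : List Int) (pos : Int) (dot : Bool) (w : String) :
    pvFA (acc, pos, dot, false) w
      = (acc ++ (if dot && w != "." then [pos] else []), pos + 1, w == ".", false) := by
  by_cases hw : w = "." <;> by_cases hd : dot <;> simp [pvFA, hw, hd]

lemma extract_eq_pvBnd_aux (t : List String) (acc : List Int) (pos : Int) (dot : Bool) :
    (t.foldl pvFA (acc, pos, dot, false)).1 = acc ++ pvBnd t pos dot := by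
  induction t generalizing acc pos dot with
  | nil => simp [pvBnd]
  | cons w ws ih =>
      rw [List.foldl_cons, pvFA_step, ih]
      simp [pvBnd]

lemma extract_eq_pvBnd (t : List String) :
    extract_sentences_beginning_positions t = pvBnd t 0 false := by
  have : extract_sentences_beginning_positions t = (t.foldl pvFA ([], 0, false, false)).1 := rfl
  rw [this, extract_eq_pvBnd_aux]
  simp

-- B's fold state after the first k words equals A's slicing loop run over the
-- boundaries of the first k words, plus the last word seen
set_option maxRecDepth 4096 in
lemma alt_fold_eq (T : List String) (k : Nat) (hk : k ≤ T.length) :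
    (PySem.List.enumerate (T.take k) 0).foldl (pvFB T) (PySem.Dict.empty, 0, none)
    = (((pvBnd (T.take k) 0 false).foldl (pvGA T) (PySem.Dict.empty, 0)).1,
       ((pvBnd (T.take k) 0 false).foldl (pvGA T) (PySem.Dict.empty, 0)).2,
       (T.take k).getLast?) := by
  induction k with
  | zero => simp [pvBnd]
  | succ k ih =>
      have hk' : k < T.length := by omega
      have ht : T.take (k + 1) = T.take k ++ [T[k]] := by
        rw [List.take_add_one]
        simp [List.getElem?_eq_getElem hk']
      have hlen : (T.take k).length = k := List.length_take_of_le (by omega)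
      rw [ht, PySem.List.enumerate_append, List.foldl_append, ih (by omega),
        pvBnd_append_singleton, List.foldl_append]
      simp only [PySem.List.enumerate_cons, PySem.List.enumerate_nil, hlen]
      rw [pvLastD_false_eq]
      by_cases hb : ((T.take k).getLast? == some ".") && (T[k] != ".")
      · rw [hb]
        simp only [List.foldl_cons, List.foldl_nil, if_true]
        refine Prod.ext ?_ (Prod.ext ?_ ?_)
        · simp [pvFB, pvGA, hb]
        · simp [pvFB, pvGA, hb]
        · simp [pvFB, hb]
          rw [ht, List.getLast?_concat]
      · rw [Bool.not_eq_true] at hb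
        rw [hb]
        refine Prod.ext ?_ (Prod.ext ?_ ?_)
        · simp [pvFB, hb]
        · simp [pvFB, hb]
        · simp [pvFB, hb]
          rw [ht, List.getLast?_concat]

lemma slice_len_eq_none (xs : List String) (a : Int) :
    PySem.List.slice xs (some a) (some (PySem.List.len xs)) = PySem.List.slice xs (some a) none := by
  simp [PySem.List.slice, pysem]

-- ===== VERDICT (by name: the statement is the Claim_ definition above) =====
theorem sentence_segmentation_spec : Claim_equal_sentence_segmentation := by
  intro text _
  show sentence_segmentation text = sentence_segmentation_alt text
  have h := alt_fold_eq text text.length (le_refl _)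
  rw [List.take_length] at h
  rw [ssA_eq, ssB_eq, extract_eq_pvBnd, h, slice_len_eq_none]
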